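-- pv_equiv track=rewrite | github.com/fateddie/asksharon_ai_blueprint | assistant/modules/calendar/helpers.py | parse_recurring_days
-- ===== SOURCE A (Python) =====
-- from typing import List, Optional, Dict
--
-- def parse_recurring_days(text: str) -> List[str]:
--     """
--     Extract days of week from natural language text.
--
--     Examples:
--         "every monday and wednesday" -> ["mon", "wed"]
--         "mon/wed/fri" -> ["mon", "wed", "fri"]
--         "monday, wednesday, friday" -> ["mon", "wed", "fri"]
--         "weekdays" -> ["mon", "tue", "wed", "thu", "fri"]
--         "every day" -> ["mon", "tue", "wed", "thu", "fri", "sat", "sun"]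
--
--     Args:
--         text: Natural language description of recurring days
--
--     Returns:
--         List of lowercase 3-letter day abbreviations: ["mon", "tue", "wed", "thu", "fri", "sat", "sun"]
--         Empty list if no days found.
--     """
--     if not text:
--         return []
--
--     text_lower = text.lower()
--
--     # Handle special cases
--     if "every day" in text_lower or "daily" in text_lower:
--         return ["mon", "tue", "wed", "thu", "fri", "sat", "sun"]
--
--     if "weekday" in text_lower:
--         return ["mon", "tue", "wed", "thu", "fri"]
--
--     if "weekend" in text_lower:
--         return ["sat", "sun"]
--
--     # Day mappings (full name and abbreviations)
--     day_mappings = {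
--         "monday": "mon", "mon": "mon",
--         "tuesday": "tue", "tue": "tue", "tues": "tue",
--         "wednesday": "wed", "wed": "wed",
--         "thursday": "thu", "thu": "thu", "thur": "thu", "thurs": "thu",
--         "friday": "fri", "fri": "fri",
--         "saturday": "sat", "sat": "sat",
--         "sunday": "sun", "sun": "sun",
--     }
--
--     # Extract all day mentions from text
--     found_days = []
--     for full_name, abbrev in day_mappings.items():
--         if full_name in text_lower:
--             if abbrev not in found_days:
--                 found_days.append(abbrev)
--
--     # Order by week (mon -> sun)
--     day_order = ["mon", "tue", "wed", "thu", "fri", "sat", "sun"]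
--     found_days.sort(key=lambda d: day_order.index(d))
--
--     return found_days
-- ===== SOURCE B (Python) =====
-- def parse_recurring_days(text):
--     """Extract day-of-week abbreviations; ordered alias groups give a sorted result directly."""
--     if not text:
--         return []
--
--     text_lower = text.lower()
--
--     if "every day" in text_lower or "daily" in text_lower:
--         return ["mon", "tue", "wed", "thu", "fri", "sat", "sun"]
--
--     if "weekday" in text_lower:
--         return ["mon", "tue", "wed", "thu", "fri"]
--
--     if "weekend" in text_lower:
--         return ["sat", "sun"]
--
--     day_groups = [
--         ("mon", ["monday", "mon"]),
--         ("tue", ["tuesday", "tue", "tues"]),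
--         ("wed", ["wednesday", "wed"]),
--         ("thu", ["thursday", "thu", "thur", "thurs"]),
--         ("fri", ["friday", "fri"]),
--         ("sat", ["saturday", "sat"]),
--         ("sun", ["sunday", "sun"]),
--     ]
--     return [abbrev for abbrev, aliases in day_groups
--             if any(alias in text_lower for alias in aliases)]
-- ===== Notes on version B (the rewrite author's own statement) =====
-- stated objective: simpler
-- what changed: Replaces the flat alias->abbrev dict with dedup-append into a list followed by a key-based sort by a single pass over Mon->Sun-ordered (abbrev, aliases) groups that emits the already-sorted result directly, with no dedup membership scan and no final sort.
import Mathlib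
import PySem

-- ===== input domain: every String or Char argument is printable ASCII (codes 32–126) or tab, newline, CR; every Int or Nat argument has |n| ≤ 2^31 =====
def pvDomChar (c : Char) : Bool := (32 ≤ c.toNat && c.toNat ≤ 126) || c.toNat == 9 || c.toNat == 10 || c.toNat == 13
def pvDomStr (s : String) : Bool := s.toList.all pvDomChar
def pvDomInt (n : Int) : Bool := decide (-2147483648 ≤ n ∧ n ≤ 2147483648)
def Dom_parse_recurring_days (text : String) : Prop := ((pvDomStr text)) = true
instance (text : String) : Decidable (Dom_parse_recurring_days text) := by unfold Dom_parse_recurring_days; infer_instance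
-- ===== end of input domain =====

-- B replaces A's flat alias→abbrev dict with dedup-append and a final sort by a single
-- pass over Mon→Sun-ordered (abbrev, aliases) groups that emits the sorted result directly (objective: simpler).

-- ===== PORT A =====
def pvDayMappings : List (String × String) :=
  [("monday","mon"), ("mon","mon"),
   ("tuesday","tue"), ("tue","tue"), ("tues","tue"),
   ("wednesday","wed"), ("wed","wed"),
   ("thursday","thu"), ("thu","thu"), ("thur","thu"), ("thurs","thu"),
   ("friday","fri"), ("fri","fri"),
   ("saturday","sat"), ("sat","sat"),
   ("sunday","sun"), ("sun","sun")]

def pvDayOrder : List String := ["mon","tue","wed","thu","fri","sat","sun"]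

-- the loop body of A's dedup-append pass over the dict items
def pvStep (tl : String) (acc : List String) (p : String × String) : List String :=
  if PySem.Str.isIn p.1 tl then (if p.2 ∈ acc then acc else acc ++ [p.2]) else acc

def parse_recurring_days (text : String) : List String :=
  if text = "" then []
  else
    let tl := PySem.Str.lower text
    if PySem.Str.isIn "every day" tl || PySem.Str.isIn "daily" tl then
      ["mon","tue","wed","thu","fri","sat","sun"]
    else if PySem.Str.isIn "weekday" tl then ["mon","tue","wed","thu","fri"]
    else if PySem.Str.isIn "weekend" tl then ["sat","sun"]
    else
      let found := pvDayMappings.foldl (pvStep tl) []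
      -- day_order.index(d): every d in found is in day_order, so ValueError is unreachable; getD 0 is never taken
      PySem.List.sorted found (fun d => ((PySem.List.index? pvDayOrder d).getD 0 : Int)) false

-- ===== PORT B =====
def pvDayGroups : List (String × List String) :=
  [("mon", ["monday","mon"]),
   ("tue", ["tuesday","tue","tues"]),
   ("wed", ["wednesday","wed"]),
   ("thu", ["thursday","thu","thur","thurs"]),
   ("fri", ["friday","fri"]),
   ("sat", ["saturday","sat"]),
   ("sun", ["sunday","sun"])]

def parse_recurring_days_alt (text : String) : List String :=
  if text = "" then []
  else
    let tl := PySem.Str.lower text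
    if PySem.Str.isIn "every day" tl || PySem.Str.isIn "daily" tl then
      ["mon","tue","wed","thu","fri","sat","sun"]
    else if PySem.Str.isIn "weekday" tl then ["mon","tue","wed","thu","fri"]
    else if PySem.Str.isIn "weekend" tl then ["sat","sun"]
    else
      (pvDayGroups.filter (fun g => g.2.any (fun a => PySem.Str.isIn a tl))).map Prod.fst

-- ===== PRECONDITION & SPEC =====
def Spec_parse_recurring_days (text : String) (out : List String) : Prop := out = parse_recurring_days_alt text
instance (text : String) (out : List String) : Decidable (Spec_parse_recurring_days text out) := by unfold Spec_parse_recurring_days; infer_instance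

-- ===== CLAIM (what is proved, stated in full; the proofs are below) =====
def Claim_equal_parse_recurring_days : Prop := ∀ (text : String), Dom_parse_recurring_days text → Spec_parse_recurring_days text (parse_recurring_days text)

-- ===== LEMMAS AND PROOFS =====

-- once an abbrev is already in acc, the rest of the entries of its group leave acc unchanged
lemma foldl_step_of_mem (tl d : String) (als : List String) (acc : List String) (hd : d ∈ acc) :
    List.foldl (pvStep tl) acc (als.map (fun n => (n, d))) = acc := by
  induction als with
  | nil => rfl
  | cons n ns ih =>
      simp only [List.map_cons, List.foldl_cons]
      have h : pvStep tl acc (n, d) = acc := by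
        unfold pvStep; simp [hd]
      rw [h, ih]

-- the fold over one alias group appends its abbrev iff some alias is a substring
lemma foldl_step_group (tl d : String) (als : List String) (acc : List String) (hd : d ∉ acc) :
    List.foldl (pvStep tl) acc (als.map (fun n => (n, d)))
      = if als.any (fun n => PySem.Str.isIn n tl) then acc ++ [d] else acc := by
  induction als with
  | nil => simp
  | cons n ns ih =>
      simp only [List.map_cons, List.foldl_cons, List.any_cons]
      by_cases h : PySem.Str.isIn n tl = true
      · have hs : pvStep tl acc (n, d) = acc ++ [d] := by
          unfold pvStep; rw [if_pos h, if_neg hd]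
        rw [hs, foldl_step_of_mem tl d ns _ (List.mem_append_right _ (List.mem_singleton_self d))]
        simp only [h, Bool.true_or, if_pos]
      · have h' : PySem.Str.isIn n tl = false := Bool.eq_false_iff.mpr h
        have hs : pvStep tl acc (n, d) = acc := by unfold pvStep; rw [if_neg h]
        rw [hs, ih]
        simp only [h', Bool.false_or]

-- A's dedup-append pass over the grouped entries produces the group-filtered abbrevs in order
lemma foldl_step_groups (tl : String) (gs : List (String × List String)) (acc : List String)
    (h1 : ∀ g ∈ gs, g.1 ∉ acc) (h2 : (gs.map Prod.fst).Nodup) :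
    List.foldl (pvStep tl) acc (gs.flatMap (fun g => g.2.map (fun n => (n, g.1))))
      = acc ++ (gs.filter (fun g => g.2.any (fun a => PySem.Str.isIn a tl))).map Prod.fst := by
  induction gs generalizing acc with
  | nil => simp
  | cons g gs ih =>
      simp only [List.flatMap_cons, List.foldl_append]
      rw [foldl_step_group tl g.1 g.2 acc (h1 g (List.mem_cons_self))]
      simp only [List.map_cons, List.nodup_cons] at h2
      by_cases h : (g.2.any fun a => PySem.Str.isIn a tl) = true
      · rw [if_pos h,
            List.filter_cons_of_pos (p := fun g : String × List String =>
              g.2.any fun a => PySem.Str.isIn a tl) h,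
            ih (acc ++ [g.1]) ?_ h2.2]
        · rw [List.map_cons, List.append_assoc, List.singleton_append]
        · intro g' hg'
          simp only [List.mem_append, List.mem_singleton, not_or]
          exact ⟨h1 g' (List.mem_cons_of_mem _ hg'),
                 fun he => h2.1 (he ▸ List.mem_map_of_mem hg')⟩
      · rw [if_neg h,
            List.filter_cons_of_neg (p := fun g : String × List String =>
              g.2.any fun a => PySem.Str.isIn a tl) h,
            ih acc (fun g' hg' => h1 g' (List.mem_cons_of_mem _ hg')) h2.2]

-- the 17 dict entries are exactly B's groups flattened
lemma mappings_eq_flatMap :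
    pvDayMappings = pvDayGroups.flatMap (fun g => g.2.map (fun n => (n, g.1))) := by decide

theorem parse_recurring_days_spec : Claim_equal_parse_recurring_days := by
  intro text _
  unfold Spec_parse_recurring_days parse_recurring_days parse_recurring_days_alt
  by_cases ht : text = ""
  · simp [ht]
  · simp only [if_neg ht]
    set tl := PySem.Str.lower text with htl
    split_ifs with h1 h2 h3
    · rfl
    · rfl
    · rfl
    · rw [mappings_eq_flatMap,
          foldl_step_groups tl pvDayGroups [] (by simp) (by decide)]
      simp only [List.nil_append]
      apply PySem.List.sorted_eq_self_of_pairwise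
      have hsub : List.Sublist
          ((pvDayGroups.filter (fun g => g.2.any (fun a => PySem.Str.isIn a tl))).map Prod.fst)
          pvDayOrder := by
        have := (List.filter_sublist
          (p := fun g : String × List String => g.2.any (fun a => PySem.Str.isIn a tl))
          (l := pvDayGroups)).map Prod.fst
        exact (by decide : pvDayGroups.map Prod.fst = pvDayOrder) ▸ this
      have hpw : pvDayOrder.Pairwise
          (fun a b => ((PySem.List.index? pvDayOrder a).getD 0 : Int)
            ≤ ((PySem.List.index? pvDayOrder b).getD 0 : Int)) := by decide
      exact hpw.sublist hsub
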